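-- pv_equiv track=rewrite | github.com/Djet78/python_homework | homework_2.py | not_occur_number_in
-- ===== SOURCE A (Python) =====
-- def not_occur_number_in(iterable):
--     """
--     Seeking lowest number witch not occur in 'iterable' and bigger than 0
--
--     :param iterable: object, excepting dict`s
--     :return: 'int'. Founded number
--     """
--     iterable = sorted(list(set(iterable)))
--     if not iterable or iterable[-1] <= 0:
--         return 1
--     if len(iterable) == 1:
--         return iterable[0] + 1
--     for idx, elem in enumerate(iterable[:-1]):
--         if elem + 1 != iterable[idx + 1]:
--             return elem + 1
--     return iterable[-1] + 1
-- ===== SOURCE B (Python) =====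
-- def not_occur_number_in(iterable):
--     s = set(iterable)
--     if not s or max(s) <= 0:
--         return 1
--     m = min(s)
--     while m + 1 in s:
--         m += 1
--     return m + 1
-- ===== Notes on version B (the rewrite author's own statement) =====
-- stated objective: alternative
-- what changed: Replaces sort-then-scan-for-a-gap over the deduplicated list by a hash-set walk: start at min(s) and step upward while the successor is in the set (asymptotically O(n) vs O(n log n), but measured only ~1.4x, so not claimed as faster).
import Mathlib
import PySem

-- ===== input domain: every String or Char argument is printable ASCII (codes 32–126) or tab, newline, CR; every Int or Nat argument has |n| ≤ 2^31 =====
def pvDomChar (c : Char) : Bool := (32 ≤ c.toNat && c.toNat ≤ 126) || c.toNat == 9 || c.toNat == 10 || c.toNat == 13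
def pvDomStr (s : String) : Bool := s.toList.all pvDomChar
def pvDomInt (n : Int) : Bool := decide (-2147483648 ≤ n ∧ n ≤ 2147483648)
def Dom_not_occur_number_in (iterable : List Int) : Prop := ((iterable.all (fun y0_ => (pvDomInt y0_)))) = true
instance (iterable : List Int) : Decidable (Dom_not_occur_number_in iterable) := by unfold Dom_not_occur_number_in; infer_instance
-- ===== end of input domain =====

-- B walks upward from min(s) inside the set instead of sorting and scanning for a gap.

-- ===== PORT A =====
-- the early-exit 'for idx, elem in enumerate(iterable[:-1])' loop, recursion over the enumerate list
def pvGapLoop (l : List Int) : List (Int × Int) → Int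
  | [] => (PySem.List.pyGet? l (-1)).getD 0 + 1
  | (idx, elem) :: rest =>
      if elem + 1 ≠ (PySem.List.pyGet? l (idx + 1)).getD 0 then elem + 1
      else pvGapLoop l rest

-- body after the rebinding 'iterable = sorted(list(set(iterable)))'
def pvAfterSort (l : List Int) : Int :=
  if l.isEmpty || ((PySem.List.pyGet? l (-1)).getD 0 ≤ 0) then 1
  else if l.length == 1 then (PySem.List.pyGet? l 0).getD 0 + 1
  else pvGapLoop l (PySem.List.enumerate (PySem.List.slice l none (some (-1))) 0)

def not_occur_number_in (iterable : List Int) : Int :=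
  pvAfterSort (PySem.List.sorted (PySem.Set.ofList iterable) (fun x => x) false)

-- ===== PORT B =====
-- the 'while m + 1 in s: m += 1' loop; fuel (number of distinct elements + 1) only makes it total
def pvWalk (s : List Int) : Nat → Int → Int
  | 0, m => m + 1
  | n + 1, m => if PySem.Set.contains s (m + 1) then pvWalk s n (m + 1) else m + 1

-- body after 's = set(iterable)'
def pvOnSet (s : PySem.Set Int) : Int :=
  match PySem.List.max? s (fun x => x) with
  | none => 1
  | some mx =>
    if mx ≤ 0 then 1
    else pvWalk s (s.length + 1) ((PySem.List.min? s (fun x => x)).getD 0)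

def not_occur_number_in_alt (iterable : List Int) : Int :=
  pvOnSet (PySem.Set.ofList iterable)

-- ===== PRECONDITION & SPEC =====
def Spec_not_occur_number_in (iterable : List Int) (out : Int) : Prop := out = not_occur_number_in_alt iterable
instance (iterable : List Int) (out : Int) : Decidable (Spec_not_occur_number_in iterable out) := by unfold Spec_not_occur_number_in; infer_instance

-- ===== CLAIM (what is proved, stated in full; the proofs are below) =====
def Claim_equal_not_occur_number_in : Prop := ∀ (iterable : List Int), Dom_not_occur_number_in iterable → Spec_not_occur_number_in iterable (not_occur_number_in iterable)

-- ===== LEMMAS AND PROOFS =====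

-- common characterization: first gap above the head of a strictly increasing chain
def pvGap (a : Int) : List Int → Int
  | [] => a + 1
  | b :: t => if a + 1 = b then pvGap b t else a + 1

-- A's loop computes pvGap (no order hypotheses needed)
set_option maxRecDepth 8192 in
theorem pvGapLoop_eq_gap (a : Int) (t : List Int) : ∀ (l : List Int) (k : Nat),
    l.drop k = a :: t →
    pvGapLoop l (PySem.List.enumerate (List.dropLast (a :: t)) (k : Int)) = pvGap a t := by
  induction t generalizing a with
  | nil =>
      intro l k hk
      have hlast : l.getLast? = some a := by
        have : l = l.take k ++ [a] := by rw [← hk]; simp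
        rw [this]; simp
      rw [show ([a] : List Int).dropLast = [] from rfl, PySem.List.enumerate_nil]
      simp only [pvGapLoop, pvGap, PySem.List.pyGet?_neg_one, hlast, Option.getD_some]
  | cons b t ih =>
      intro l k hk
      have hb : PySem.List.pyGet? l ((k : Int) + 1) = some b := by
        have h1 : PySem.List.pyGet? l (((k + 1 : Nat) : Int)) = l[k+1]? := PySem.List.pyGet?_natCast l (k+1)
        have h2 : l[k+1]? = some b := by
          have : (l.drop k)[1]? = some b := by rw [hk]; rfl
          simpa [List.getElem?_drop] using this
        have : ((k + 1 : Nat) : Int) = (k : Int) + 1 := by push_cast; ring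
        rw [← this, h1, h2]
      have hstep : List.dropLast (a :: b :: t) = a :: List.dropLast (b :: t) := rfl
      rw [hstep, PySem.List.enumerate_cons]
      by_cases hgap : a + 1 = b
      · have hdrop : l.drop (k + 1) = b :: t := by
          have h := congrArg List.tail hk
          rw [List.tail_drop] at h
          simpa using h
        simp only [pvGapLoop, hb, Option.getD_some]
        rw [if_neg (show ¬ (a + 1 ≠ b) from fun h => h hgap),
            show (k : Int) + 1 = ((k + 1 : Nat) : Int) by push_cast; ring,
            ih b l (k + 1) hdrop]
        simp [pvGap, hgap]
      · simp only [pvGapLoop, hb, Option.getD_some]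
        rw [if_pos hgap]
        simp [pvGap, hgap]

-- walk only looks at membership
theorem pvWalk_congr (s l : List Int) (h : ∀ x : Int, x ∈ s ↔ x ∈ l) :
    ∀ (n : Nat) (m : Int), pvWalk s n m = pvWalk l n m := by
  intro n
  induction n with
  | zero => intro m; rfl
  | succ n ih =>
      intro m
      have hm : PySem.Set.contains s (m + 1) = PySem.Set.contains l (m + 1) := by
        simp [PySem.Set.contains_eq_listContains, h]
      simp only [pvWalk, hm]
      split <;> simp [ih]

-- dropping a small head does not change the walk
theorem pvWalk_cons_ge (a : Int) (t : List Int) :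
    ∀ (n : Nat) (m : Int), a ≤ m → pvWalk (a :: t) n m = pvWalk t n m := by
  intro n
  induction n with
  | zero => intro m _; rfl
  | succ n ih =>
      intro m hm
      have : PySem.Set.contains (a :: t) (m + 1) = PySem.Set.contains t (m + 1) := by
        simp [PySem.Set.contains_eq_listContains]
        intro h; omega
      simp only [pvWalk, this]
      split <;> simp [ih (m + 1) (by omega)]

-- on a strictly increasing chain the walk from the head computes pvGap
theorem pvWalk_chain (t : List Int) : ∀ (a : Int) (n : Nat), t.length < n →
    (a :: t).Pairwise (· < ·) → pvWalk (a :: t) n a = pvGap a t := by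
  induction t with
  | nil =>
      intro a n hn _
      obtain ⟨n', rfl⟩ := Nat.exists_eq_succ_of_ne_zero (by omega : n ≠ 0)
      simp [pvWalk, pvGap, PySem.Set.contains_eq_listContains]
  | cons b t ih =>
      intro a n hn hp
      obtain ⟨n', rfl⟩ := Nat.exists_eq_succ_of_ne_zero (by omega : n ≠ 0)
      have hab : a < b := (List.pairwise_cons.1 hp).1 b (by simp)
      have hpt : (b :: t).Pairwise (· < ·) := (List.pairwise_cons.1 hp).2
      by_cases hgap : a + 1 = b
      · have hmem : PySem.Set.contains (a :: b :: t) (a + 1) = true := by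
          simp [PySem.Set.contains_eq_listContains, hgap]
        simp only [pvWalk, hmem, if_pos]
        rw [pvWalk_cons_ge a (b :: t) n' (a + 1) (by omega), hgap,
            ih b n' (by simpa using Nat.lt_of_succ_lt_succ hn) hpt]
        simp [pvGap, hgap]
      · have hnotin : (a + 1) ∉ (a :: b :: t) := by
          have ht : ∀ x ∈ t, b < x := fun x hx => (List.pairwise_cons.1 hpt).1 x hx
          intro h
          rcases List.mem_cons.1 h with h1 | h
          · omega
          rcases List.mem_cons.1 h with h1 | h
          · omega
          · have := ht _ h; omega
        simp [pvWalk, pvGap, hgap]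
        intro h
        exact absurd (by simp [h] : a + 1 ∈ a :: b :: t) hnotin

-- every member of a strictly increasing chain is ≤ its last element
theorem chain_le_getLast (l : List Int) (hp : l.Pairwise (· < ·)) (x : Int) (hx : x ∈ l)
    (h : l ≠ []) : x ≤ l.getLast h := by
  induction l with
  | nil => cases hx
  | cons a t ih =>
      cases t with
      | nil => simp at hx; simp [hx]
      | cons b t' =>
          rcases List.mem_cons.1 hx with rfl | hx'
          · have : (b :: t').getLast (by simp) ∈ b :: t' := List.getLast_mem _
            have := (List.pairwise_cons.1 hp).1 _ this
            simpa [List.getLast] using le_of_lt this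
          · simpa [List.getLast] using ih (List.pairwise_cons.1 hp).2 hx' (by simp)

theorem pvMain (s : List Int)
    (hpw : (PySem.List.sorted s (fun x => x) false).Pairwise (· < ·)) :
    pvAfterSort (PySem.List.sorted s (fun x => x) false) = pvOnSet s := by
  have hperm : (PySem.List.sorted s (fun x => x) false).Perm s :=
    PySem.List.sorted_perm s (fun x => x) false
  generalize hL : PySem.List.sorted s (fun x => x) false = l at hperm hpw
  have hmemls : ∀ x : Int, x ∈ s ↔ x ∈ l := fun x => (hperm.mem_iff).symm
  cases hcl : l with
  | nil =>
      subst hcl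
      have hse : s = [] := by
        have := hperm.length_eq; simpa using List.eq_nil_of_length_eq_zero this.symm
      subst hse
      simp [pvAfterSort, pvOnSet,
        show PySem.List.max? ([] : List Int) (fun x => x) = none from
          (PySem.List.max?_eq_none_iff _ _).2 rfl]
  | cons a t =>
      subst hcl
      have hlne : (a :: t : List Int) ≠ [] := by simp
      have hsne : s ≠ [] := by
        intro h; subst h
        have := hperm.length_eq; simp at this
      obtain ⟨mx, hmx⟩ : ∃ mx, PySem.List.max? s (fun x => x) = some mx := by
        cases h : PySem.List.max? s (fun x => x) with
        | none => exact absurd ((PySem.List.max?_eq_none_iff _ _).1 h) hsne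
        | some mx => exact ⟨mx, rfl⟩
      obtain ⟨mn, hmn⟩ : ∃ mn, PySem.List.min? s (fun x => x) = some mn := by
        cases h : PySem.List.min? s (fun x => x) with
        | none => exact absurd ((PySem.List.min?_eq_none_iff _ _).1 h) hsne
        | some mn => exact ⟨mn, rfl⟩
      have hlast : (a :: t).getLast? = some ((a :: t).getLast hlne) :=
        List.getLast?_eq_some_getLast hlne
      have hmx_eq : mx = (a :: t).getLast hlne := by
        have h1 : mx ∈ (a :: t) := (hmemls mx).1 (PySem.List.max?_mem hmx)
        have h2 : mx ≤ (a :: t).getLast hlne := chain_le_getLast _ hpw mx h1 hlne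
        have h3 : (a :: t).getLast hlne ≤ mx := by
          have := PySem.List.max?_isMax hmx ((a :: t).getLast hlne)
            ((hmemls _).2 (List.getLast_mem hlne))
          simpa using this
        omega
      have hmn_eq : mn = a := by
        have h1 : mn ∈ (a :: t) := (hmemls mn).1 (PySem.List.min?_mem hmn)
        have h2 : a ≤ mn := by
          rcases List.mem_cons.1 h1 with rfl | h1'
          · omega
          · exact le_of_lt ((List.pairwise_cons.1 hpw).1 mn h1')
        have h3 : mn ≤ a := by
          have := PySem.List.min?_isMin hmn a ((hmemls a).2 (by simp))
          simpa using this
        omega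
      unfold pvAfterSort pvOnSet
      rw [PySem.List.pyGet?_neg_one, hlast, hmx]
      by_cases hpos : (a :: t).getLast hlne ≤ 0
      · simp [hpos, hmx_eq]
      · have hwalk : pvWalk s (s.length + 1) a = pvGap a t := by
          rw [pvWalk_congr s (a :: t) hmemls]
          have hlen : t.length < s.length + 1 := by
            have := hperm.length_eq; simp at this; omega
          exact pvWalk_chain t a (s.length + 1) hlen hpw
        rw [if_neg (show ¬ (((a :: t).isEmpty
              || decide (((some ((a :: t).getLast hlne)).getD 0) ≤ 0)) = true) by
              simp only [List.isEmpty_cons, Bool.false_or, Option.getD_some, decide_eq_true_eq]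
              exact hpos),
            ]
        show _ = if mx ≤ 0 then 1 else pvWalk s (s.length + 1) ((PySem.List.min? s (fun x => x)).getD 0)
        rw [if_neg (show ¬ (mx ≤ 0) from hmx_eq ▸ hpos),
            hmn, Option.getD_some, hmn_eq, hwalk]
        by_cases hone : t = []
        · subst hone
          simp [pvGap]
        · rw [if_neg (show ¬ (((a :: t).length == 1) = true) by
              simp [List.length_eq_zero_iff, hone])]
          rw [PySem.List.slice_to_neg_one]
          have := pvGapLoop_eq_gap a t (a :: t) 0 (by simp)
          simpa using this

theorem not_occur_number_in_spec : Claim_equal_not_occur_number_in := by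
  unfold Claim_equal_not_occur_number_in
  intro iterable _
  unfold Spec_not_occur_number_in not_occur_number_in not_occur_number_in_alt
  exact pvMain (PySem.Set.ofList iterable) (PySem.List.sorted_ofList_pairwise_lt iterable)
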